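-- pv_equiv track=rewrite | github.com/NP-Hardest/Polynomial-Multiplication-Toom-K | python_scripts/f2.py | div_by_x4_plus_x
-- ===== SOURCE A (Python) =====
-- def div_by_x4_plus_x(p):
--     n = len(p)
--     def p_at(j):
--         return p[j] if 0 <= j < n else 0
--
--     q = [0] * n
--     # q_{-3}, q_{-2}, q_{-1}
--     for i in range(n):
--         q_i = p_at(i + 1) ^ (q[i-3] if i-3 >= 0 else 0)
--         q[i] = q_i
--     return q
-- ===== SOURCE B (Python) =====
-- def div_by_x4_plus_x(p):
--     # Three independent mod-3 chains, each threaded by a running accumulator.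
--     n = len(p)
--     q = [0] * n
--     for r in range(3):
--         acc = 0
--         for j in range(r, n, 3):
--             acc ^= p[j + 1] if j + 1 < n else 0
--             q[j] = acc
--     return q
-- ===== Notes on version B (the rewrite author's own statement) =====
-- stated objective: alternative
-- what changed: Replaces the single pass that looks back into the output array (q[i-3]) by three independent mod-3 chains, each threaded by a scalar running XOR accumulator, so the output array is never read.
import Mathlib
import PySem

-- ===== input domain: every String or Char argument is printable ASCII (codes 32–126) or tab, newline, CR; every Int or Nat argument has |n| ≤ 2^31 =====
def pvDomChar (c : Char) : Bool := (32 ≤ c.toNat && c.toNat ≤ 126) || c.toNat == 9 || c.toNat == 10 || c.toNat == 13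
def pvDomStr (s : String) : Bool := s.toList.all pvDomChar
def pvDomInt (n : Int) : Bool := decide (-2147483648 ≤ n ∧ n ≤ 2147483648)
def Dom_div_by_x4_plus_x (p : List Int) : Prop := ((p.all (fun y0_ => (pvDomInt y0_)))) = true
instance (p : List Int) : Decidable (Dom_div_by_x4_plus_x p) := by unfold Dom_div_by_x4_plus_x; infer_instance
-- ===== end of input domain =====

-- B replaces A's single pass with array look-back (q[i-3]) by three independent mod-3 chains,
-- each threaded by a scalar running-XOR accumulator (alternative decomposition, same cost).


-- ===== PORT A =====
-- literal port of A: q[i] = p_at(i+1) ^ (q[i-3] if i-3 >= 0 else 0), one pass i = 0..n-1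
def div_by_x4_plus_x (p : List Int) : List Int :=
  let n : Int := p.length
  let pAt : Int → Int := fun j => if 0 ≤ j ∧ j < n then PySem.List.pyGetD p j 0 else 0
  (PySem.List.pyRange 0 n 1).foldl
    (fun q i =>
      let q_i := PySem.Int.bxor (pAt (i + 1)) (if i - 3 ≥ 0 then PySem.List.pyGetD q (i - 3) 0 else 0)
      PySem.List.pySetD q i q_i)
    (List.replicate n.toNat 0)

-- ===== PORT B =====
-- literal port of B: for r in range(3): acc = 0; for j in range(r, n, 3): acc ^= (p[j+1] if j+1 < n else 0); q[j] = acc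
def div_by_x4_plus_x_alt (p : List Int) : List Int :=
  let n : Int := p.length
  (PySem.List.pyRange 0 3 1).foldl
    (fun q r =>
      ((PySem.List.pyRange r n 3).foldl
        (fun (st : List Int × Int) j =>
          let acc := PySem.Int.bxor st.2 (if j + 1 < n then PySem.List.pyGetD p (j + 1) 0 else 0)
          (PySem.List.pySetD st.1 j acc, acc))
        (q, 0)).1)
    (List.replicate n.toNat 0)

-- ===== PRECONDITION & SPEC =====
def Spec_div_by_x4_plus_x (p : List Int) (out : List Int) : Prop := out = div_by_x4_plus_x_alt p
instance (p : List Int) (out : List Int) : Decidable (Spec_div_by_x4_plus_x p out) := by unfold Spec_div_by_x4_plus_x; infer_instance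

-- ===== CLAIM (what is proved, stated in full; the proofs are below) =====
def Claim_equal_div_by_x4_plus_x : Prop := ∀ (p : List Int), Dom_div_by_x4_plus_x p → Spec_div_by_x4_plus_x p (div_by_x4_plus_x p)

-- ===== LEMMAS AND PROOFS =====

-- the mathematical recurrence both programs compute: f j = p_at(j+1) xor f (j-3)
def fN (p : List Int) (j : Nat) : Int :=
  PySem.Int.bxor (p.getD (j + 1) 0) (if _h : 3 ≤ j then fN p (j - 3) else 0)
termination_by j
decreasing_by omega

theorem fN_def (p : List Int) (j : Nat) :
    fN p j = PySem.Int.bxor (p.getD (j + 1) 0) (if _h : 3 ≤ j then fN p (j - 3) else 0) := by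
  rw [fN]

-- the state of A's loop after k iterations
def maskA (p : List Int) (k : Nat) : List Int :=
  (List.range p.length).map (fun j => if j < k then fN p j else 0)

-- getD after set, at the written / an unwritten position
theorem getD_set_self_pv (q : List Int) (k : Nat) (v : Int) (h : k < q.length) :
    (q.set k v).getD k 0 = v := by
  rw [List.getD_eq_getElem _ _ (by simpa using h), List.getElem_set]; simp

theorem getD_set_ne_pv (q : List Int) (k j : Nat) (v : Int) (h : j ≠ k) :
    (q.set k v).getD j 0 = q.getD j 0 := by
  simp [List.getD, List.getElem?_set_ne (by omega : k ≠ j)]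

-- out-of-range guard around indexing collapses to getD
theorem getD_guard_pv (p : List Int) (k : Nat) :
    (if (k : Int) < (p.length : Int) then p.getD k 0 else 0) = p.getD k 0 := by
  split
  · rfl
  · exact (List.getD_eq_default _ _ (by omega)).symm

-- A's loop body on Nat indices
def stepA (p : List Int) (q : List Int) (i : Nat) : List Int :=
  q.set i (PySem.Int.bxor (p.getD (i + 1) 0) (if 3 ≤ i then q.getD (i - 3) 0 else 0))

theorem maskA_zero (p : List Int) : maskA p 0 = List.replicate p.length 0 := by
  simp [maskA]

theorem getD_maskA (p : List Int) (k j : Nat) (hj : j < p.length) :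
    (maskA p k).getD j 0 = if j < k then fN p j else 0 := by
  unfold maskA; rw [PySem.List.getD_map_range _ _ _ _ hj]

theorem maskA_succ (p : List Int) (k : Nat) (hk : k < p.length) :
    stepA p (maskA p k) k = maskA p (k + 1) := by
  have hv : (PySem.Int.bxor (p.getD (k + 1) 0)
      (if 3 ≤ k then (maskA p k).getD (k - 3) 0 else 0)) = fN p k := by
    rw [fN_def]
    by_cases h3 : 3 ≤ k
    · rw [if_pos h3, dif_pos h3, getD_maskA p k (k - 3) (by omega), if_pos (by omega)]
    · rw [if_neg h3, dif_neg h3]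
  apply List.ext_getElem
  · simp [stepA, maskA]
  · intro j hj hj'
    simp only [stepA, List.getElem_set]
    by_cases hjk : k = j
    · subst hjk
      rw [if_pos rfl, hv]
      simp only [maskA, List.getElem_map, List.getElem_range]
      rw [if_pos (by omega)]
    · rw [if_neg hjk]
      simp only [maskA, List.getElem_map, List.getElem_range]
      by_cases hjl : j < k
      · rw [if_pos hjl, if_pos (by omega)]
      · rw [if_neg hjl, if_neg (by omega)]

theorem foldlA (p : List Int) (k : Nat) (hk : k ≤ p.length) :
    (List.range k).foldl (stepA p) (List.replicate p.length 0) = maskA p k := by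
  induction k with
  | zero => simp [maskA_zero]
  | succ k ih =>
    rw [List.range_succ, List.foldl_append, ih (by omega)]
    simpa using maskA_succ p k (by omega)

theorem portA_eq (p : List Int) : div_by_x4_plus_x p = maskA p p.length := by
  simp only [div_by_x4_plus_x]
  rw [PySem.List.pyRange_one, List.foldl_map]
  simp only [zero_add, sub_zero, Int.toNat_natCast]
  rw [PySem.List.foldl_congr_mem _ _ (stepA p) _ ?_]
  · exact foldlA p p.length le_rfl
  · intro q k _
    rw [PySem.List.pySetD_natCast, stepA]
    congr 1
    congr 1
    · rw [show ((k : Int) + 1) = ((k + 1 : Nat) : Int) from by push_cast; ring,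
        PySem.List.pyGetD_natCast]
      by_cases h : ((k + 1 : Nat) : Int) < (p.length : Int)
      · rw [if_pos ⟨by positivity, h⟩]
      · rw [if_neg (fun hc => h hc.2)]
        exact (List.getD_eq_default _ _ (by omega)).symm
    · by_cases h3 : 3 ≤ k
      · rw [if_pos (by omega), if_pos h3,
          show ((k : Int) - 3) = ((k - 3 : Nat) : Int) from by omega,
          PySem.List.pyGetD_natCast]
      · rw [if_neg (by omega), if_neg h3]

-- B's inner-loop body on Nat chain positions
def stepB (p : List Int) (r : Nat) (st : List Int × Int) (t : Nat) : List Int × Int :=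
  (st.1.set (r + 3 * t) (PySem.Int.bxor st.2 (p.getD (r + 3 * t + 1) 0)),
   PySem.Int.bxor st.2 (p.getD (r + 3 * t + 1) 0))

-- number of elements of range(r, n, 3), as pyRange_of_pos produces it
def mB (p : List Int) (r : Nat) : Nat :=
  if (r : Int) < (p.length : Int) then (((p.length : Int) - (r : Int) + 3 - 1) / 3).toNat else 0

theorem chain_inv (p : List Int) (r : Nat) (hr : r < 3) :
    ∀ (l c : Nat) (q : List Int) (acc : Int),
      q.length = p.length →
      acc = (if c = 0 then 0 else fN p (r + 3 * (c - 1))) →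
      (((List.range' c l).foldl (stepB p r) (q, acc)).1.length = p.length ∧
       ∀ j, j < p.length →
         ((List.range' c l).foldl (stepB p r) (q, acc)).1.getD j 0 =
           if (j % 3 = r % 3 ∧ r + 3 * c ≤ j ∧ j < r + 3 * (c + l)) then fN p j else q.getD j 0) := by
  intro l
  induction l with
  | zero =>
    intro c q acc hq _
    refine ⟨by simpa using hq, fun j hj => ?_⟩
    simp only [List.range', List.foldl_nil]
    rw [if_neg (by omega)]
  | succ l ih =>
    intro c q acc hq hacc
    rw [List.range'_succ, List.foldl_cons]
    have ha : PySem.Int.bxor acc (p.getD (r + 3 * c + 1) 0) = fN p (r + 3 * c) := by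
      by_cases hc : c = 0
      · subst hc
        rw [hacc, if_pos rfl]
        simp only [Nat.mul_zero, Nat.add_zero]
        rw [fN_def, dif_neg (by omega : ¬ 3 ≤ r), PySem.Int.bxor_zero]
        rw [PySem.Int.bxor_comm]
        rw [PySem.Int.bxor_zero]
      · rw [hacc, if_neg hc]
        conv_rhs => rw [fN_def]
        rw [dif_pos (by omega : 3 ≤ r + 3 * c),
          show r + 3 * c - 3 = r + 3 * (c - 1) from by omega, PySem.Int.bxor_comm]
    have hstep : stepB p r (q, acc) c =
        (q.set (r + 3 * c) (fN p (r + 3 * c)), fN p (r + 3 * c)) := by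
      simp only [stepB, ha]
    rw [hstep]
    obtain ⟨ihlen, ihget⟩ := ih (c + 1) (q.set (r + 3 * c) (fN p (r + 3 * c))) (fN p (r + 3 * c))
      (by simpa using hq) (by rw [if_neg (by omega), show c + 1 - 1 = c from rfl])
    refine ⟨ihlen, fun j hj => ?_⟩
    rw [ihget j hj]
    by_cases hjc : j = r + 3 * c
    · subst hjc
      rw [getD_set_self_pv _ _ _ (by omega)]
      split_ifs with h1 h2 h2
      · rfl
      · exfalso; omega
      · rfl
      · exfalso; omega
    · rw [getD_set_ne_pv _ _ _ _ hjc]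
      split_ifs with h1 h2 h2
      · rfl
      · exfalso; omega
      · exfalso; omega
      · rfl

-- the inner pyRange(r, n, 3) fold is the Nat-indexed stepB fold
theorem innerB_eq (p : List Int) (q : List Int) (rz : Int) (r : Nat) (hrz : rz = (r : Int)) :
    ((PySem.List.pyRange rz (p.length : Int) 3).foldl
      (fun (st : List Int × Int) j =>
        (PySem.List.pySetD st.1 j
          (PySem.Int.bxor st.2 (if j + 1 < (p.length : Int) then PySem.List.pyGetD p (j + 1) 0 else 0)),
         PySem.Int.bxor st.2 (if j + 1 < (p.length : Int) then PySem.List.pyGetD p (j + 1) 0 else 0)))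
      (q, 0)) =
    (List.range (mB p r)).foldl (stepB p r) (q, 0) := by
  subst hrz
  rw [PySem.List.pyRange_of_pos _ _ (by norm_num : (0 : Int) < 3), List.foldl_map]
  rw [show (if (r : Int) < (p.length : Int) then (((p.length : Int) - (r : Int) + 3 - 1) / 3).toNat else 0) = mB p r from rfl]
  apply PySem.List.foldl_congr_mem
  intro st t _
  have hcast : (r : Int) + 3 * (t : Int) = ((r + 3 * t : Nat) : Int) := by push_cast; ring
  have hcast1 : ((r + 3 * t : Nat) : Int) + 1 = ((r + 3 * t + 1 : Nat) : Int) := by push_cast; ring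
  simp only [hcast, hcast1, PySem.List.pySetD_natCast, PySem.List.pyGetD_natCast,
    getD_guard_pv, stepB]

-- final state of one chain, from the invariant
theorem chainB (p : List Int) (r : Nat) (hr : r < 3) (q : List Int) (hq : q.length = p.length) :
    (((List.range (mB p r)).foldl (stepB p r) (q, 0)).1.length = p.length ∧
     ∀ j, j < p.length →
       ((List.range (mB p r)).foldl (stepB p r) (q, 0)).1.getD j 0 =
         if j % 3 = r % 3 then fN p j else q.getD j 0) := by
  have h := chain_inv p r hr (mB p r) 0 q 0 hq (by rw [if_pos rfl])
  rw [List.range_eq_range']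
  refine ⟨h.1, fun j hj => ?_⟩
  rw [h.2 j hj]
  split_ifs with h1 h2 h2
  · rfl
  · exact absurd h1.1 h2
  · exfalso
    apply h1
    refine ⟨h2, by omega, ?_⟩
    have hrn : (r : Int) < (p.length : Int) := by omega
    unfold mB
    rw [if_pos hrn]
    omega
  · rfl

theorem portB_eq (p : List Int) : div_by_x4_plus_x_alt p = maskA p p.length := by
  simp only [div_by_x4_plus_x_alt]
  rw [show PySem.List.pyRange 0 3 1 = [0, 1, 2] from by decide]
  simp only [List.foldl_cons, List.foldl_nil, Int.toNat_natCast]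
  rw [innerB_eq p _ 0 0 (by norm_num), innerB_eq p _ 1 1 (by norm_num),
    innerB_eq p _ 2 2 (by norm_num)]
  obtain ⟨hl0, hg0⟩ := chainB p 0 (by omega) (List.replicate p.length 0) (by simp)
  obtain ⟨hl1, hg1⟩ := chainB p 1 (by omega) _ hl0
  obtain ⟨hl2, hg2⟩ := chainB p 2 (by omega) _ hl1
  apply List.ext_getElem
  · rw [hl2]; simp [maskA]
  · intro j hj hj'
    have hjlen : j < p.length := by omega
    have hG : (((List.range (mB p 2)).foldl (stepB p 2)
        (((List.range (mB p 1)).foldl (stepB p 1)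
          (((List.range (mB p 0)).foldl (stepB p 0) (List.replicate p.length 0, 0)).1, 0)).1, 0)).1).getD j 0
        = fN p j := by
      rw [hg2 j hjlen]
      by_cases h2 : j % 3 = 2
      · rw [if_pos (by omega)]
      · rw [if_neg (by omega), hg1 j hjlen]
        by_cases h1 : j % 3 = 1
        · rw [if_pos (by omega)]
        · rw [if_neg (by omega), hg0 j hjlen, if_pos (by omega)]
    rw [← List.getD_eq_getElem _ 0 hj, hG]
    unfold maskA
    rw [List.getElem_map, List.getElem_range, if_pos (by omega)]

-- ===== VERDICT (by name: the statement is the Claim_ definition above) =====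
theorem div_by_x4_plus_x_spec : Claim_equal_div_by_x4_plus_x := by
  intro p _
  unfold Spec_div_by_x4_plus_x
  rw [portA_eq, portB_eq]
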